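-- pv_equiv track=rewrite | github.com/jujuwon/Algorithm | programmers/etc/PRO152995/PRO152995.py | solution
-- ===== SOURCE A (Python) =====
-- def solution(scores):
--     answer = 1
--
--     me = scores[0]
--     scores.sort(key=lambda x : (-x[0], x[1]))
--     check = 0
--
--     for score in scores:
--         if me == score:
--             if me[1] < check:
--                 return -1
--             else:
--                 check = score[1]
--                 continue
--         if score[1] >= check:
--             check = score[1]
--             if (score[0] + score[1]) > (me[0] + me[1]):
--                 answer += 1
--
--     return answer
-- ===== SOURCE B (Python) =====
-- # B: direct O(n^2) brute force over the domination relation, instead of A's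
-- # sort-and-sweep with a running maximum.  The in-place sort is kept only so the
-- # caller observes the same mutation of `scores` as with A; the answer does not
-- # depend on it.
-- def beats(scores, a, b):
--     return any(t[0] > a and t[1] > b for t in scores)
--
-- def solution(scores):
--     me = scores[0]
--     scores.sort(key=lambda x: (-x[0], x[1]))
--     if beats(scores, me[0], me[1]):
--         return -1
--     answer = 1
--     for s in scores:
--         if s[0] + s[1] > me[0] + me[1] and not beats(scores, s[0], s[1]):
--             answer += 1
--     return answer
-- ===== Notes on version B (the rewrite author's own statement) =====
-- stated objective: simpler
-- what changed: A's sort-then-sweep with a running maximum 'check' and early return is replaced by a direct brute-force over the strict-domination relation: return -1 if someone strictly dominates scores[0], else count undominated employees with a larger sum (the in-place sort is kept only for side-effect parity).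
-- intended difference: When nobody strictly dominates scores[0] but its second score is negative (A returns -1 instead of a rank), or when some undominated pair with a negative second score has a larger sum than scores[0] (A omits it from the rank count), A's 'check = 0' initialisation invents a phantom competitor with second score 0; B returns the true domination-based rank, which is the intended value. — e.g. on solution([[0, -1]]): A returns -1, B returns 1
import Mathlib
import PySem

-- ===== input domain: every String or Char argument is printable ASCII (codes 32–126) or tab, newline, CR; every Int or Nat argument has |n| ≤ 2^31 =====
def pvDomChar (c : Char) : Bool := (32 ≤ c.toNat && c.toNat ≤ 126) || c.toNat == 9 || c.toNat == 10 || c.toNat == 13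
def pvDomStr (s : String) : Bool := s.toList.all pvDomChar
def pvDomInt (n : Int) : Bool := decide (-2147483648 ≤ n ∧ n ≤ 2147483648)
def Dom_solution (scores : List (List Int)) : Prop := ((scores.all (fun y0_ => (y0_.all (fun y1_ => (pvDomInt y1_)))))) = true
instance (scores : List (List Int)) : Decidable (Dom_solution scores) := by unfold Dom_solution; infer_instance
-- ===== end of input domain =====

-- B replaces A's sort-and-sweep (running maximum + early return) by a brute-force
-- count over the strict-domination relation; objective: simpler.  A sorts `scores`
-- in place; Source B performs the same sort, and the equivalence proved here is about
-- the return value.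

-- ===== PORT A =====
-- x[0] / x[1] are ported as List.getD (exact under Pre_, which demands length ≥ 2);
-- the Python key tuple (-x[0], x[1]) is the lexicographic pair, ported as toLex.
-- The for-loop with early `return -1` becomes structural recursion over the sorted
-- list carrying the same state (check, answer).
def solLoopA (me : List Int) : List (List Int) → Int → Int → Int
  | [], _check, answer => answer
  | s :: rest, check, answer =>
    if me = s then
      if me.getD 1 0 < check then -1
      else solLoopA me rest (s.getD 1 0) answer
    else if s.getD 1 0 ≥ check then
      solLoopA me rest (s.getD 1 0)
        (if s.getD 0 0 + s.getD 1 0 > me.getD 0 0 + me.getD 1 0 then answer + 1 else answer)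
    else solLoopA me rest check answer

def solution (scores : List (List Int)) : Int :=
  match scores with
  | [] => 0  -- scores[0] raises IndexError; excluded by Pre_solution
  | me :: _ =>
    let ys := PySem.List.sorted scores (fun x => toLex (-(x.getD 0 0), x.getD 1 0))
    solLoopA me ys 0 1

-- ===== PORT B =====
def beats (scores : List (List Int)) (a b : Int) : Bool :=
  scores.any (fun t => decide (t.getD 0 0 > a) && decide (t.getD 1 0 > b))

def solution_alt (scores : List (List Int)) : Int :=
  match scores with
  | [] => 0  -- scores[0] raises IndexError; excluded by Pre_solution
  | me :: _ =>
    let ys := PySem.List.sorted scores (fun x => toLex (-(x.getD 0 0), x.getD 1 0))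
    if beats ys (me.getD 0 0) (me.getD 1 0) then -1
    else
      ys.foldl
        (fun answer s =>
          if decide (s.getD 0 0 + s.getD 1 0 > me.getD 0 0 + me.getD 1 0)
              && !beats ys (s.getD 0 0) (s.getD 1 0)
          then answer + 1 else answer) 1

-- ===== PRECONDITION & SPEC =====
-- Pre_: exactly where the Python A returns normally: a nonempty list whose inner
-- lists all have at least two entries (scores[0], x[0], x[1] raise otherwise).
def Pre_solution (scores : List (List Int)) : Prop :=
  scores ≠ [] ∧ ∀ s ∈ scores, 2 ≤ s.length
instance (scores : List (List Int)) : Decidable (Pre_solution scores) := by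
  unfold Pre_solution; infer_instance

def pvWitness_solution : List (List Int) := [[2, 2], [3, 1], [1, 4]]

-- On inputs where nobody strictly dominates scores[0] but scores[0][1] < 0 (A returns
-- -1 instead of a rank), or where some undominated pair with negative second entry has
-- a larger sum than scores[0] (A omits it from the count), A's `check = 0` initialisation
-- invents a phantom competitor with second score 0; B returns the true domination-based
-- rank, the intended value.
-- vocabulary of D_: strict domination, the score sum, a negative second score
abbrev pvBeat (l : List (List Int)) (s : List Int) : Prop :=
  ∃ t ∈ l, s.getD 0 0 < t.getD 0 0 ∧ s.getD 1 0 < t.getD 1 0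
abbrev pvSum (s : List Int) : Int := s.getD 0 0 + s.getD 1 0
abbrev pvNeg (s : List Int) : Prop := s.getD 1 0 < 0

def D_solution (scores : List (List Int)) : Prop :=
  ¬ pvBeat scores scores.headI ∧
  (pvNeg scores.headI ∨
    ∃ s ∈ scores, pvNeg s ∧ pvSum scores.headI < pvSum s ∧ ¬ pvBeat scores s)
instance (scores : List (List Int)) : Decidable (D_solution scores) := by
  unfold D_solution; infer_instance

def Spec_solution (scores : List (List Int)) (out : Int) : Prop :=
  ¬ D_solution scores → out = solution_alt scores
instance (scores : List (List Int)) (out : Int) : Decidable (Spec_solution scores out) := by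
  unfold Spec_solution; infer_instance

def pvDiffWitness_solution : List (List Int) := [[0, -1]]
def pvDiffWitnessOut_solution : Int × Int := (-1, 1)

-- ===== CLAIM (what is proved, stated in full; the proofs are below) =====
def Claim_unchanged_solution : Prop :=
  ∀ (scores : List (List Int)), Dom_solution scores → Pre_solution scores →
    Spec_solution scores (solution scores)
def Claim_changed_solution : Prop :=
  Dom_solution (pvDiffWitness_solution) ∧ Pre_solution (pvDiffWitness_solution) ∧
  D_solution (pvDiffWitness_solution) ∧
  solution (pvDiffWitness_solution) = pvDiffWitnessOut_solution.1 ∧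
  solution_alt (pvDiffWitness_solution) = pvDiffWitnessOut_solution.2 ∧
  pvDiffWitnessOut_solution.1 ≠ pvDiffWitnessOut_solution.2
def Claim_exact_solution : Prop :=
  ∀ (scores : List (List Int)), Dom_solution scores → Pre_solution scores →
    D_solution scores → solution scores ≠ solution_alt scores

-- ===== LEMMAS AND PROOFS =====

-- first (f) and second (g) component of a score pair, and the sum threshold
def pvF (s : List Int) : Int := s.getD 0 0
def pvG (s : List Int) : Int := s.getD 1 0

-- running maximum of second components over a processed prefix, seeded with A's `check = 0`
def pvCmax (P : List (List Int)) : Int := P.foldl (fun acc s => max acc (pvG s)) 0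

-- "s is strictly dominated by some element of l"
abbrev pvLoses (l : List (List Int)) (s : List Int) : Prop :=
  ∃ t ∈ l, pvF s < pvF t ∧ pvG s < pvG t

-- "A additionally treats s as dominated when g s < 0 (check = 0 phantom)"
abbrev pvBadA (l : List (List Int)) (s : List Int) : Prop := pvG s < 0 ∨ pvLoses l s

theorem pv_foldl_max_le (P : List (List Int)) (a v : Int) :
    P.foldl (fun acc s => max acc (pvG s)) a ≤ v ↔ a ≤ v ∧ ∀ p ∈ P, pvG p ≤ v := by
  induction P generalizing a with
  | nil => simp
  | cons q Q ih =>
    simp only [List.foldl_cons, ih, List.mem_cons]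
    constructor
    · rintro ⟨h1, h2⟩
      exact ⟨le_of_max_le_left h1, fun p hp => hp.elim (fun e => e ▸ le_of_max_le_right h1) (h2 p)⟩
    · rintro ⟨h1, h2⟩
      exact ⟨max_le h1 (h2 q (Or.inl rfl)), fun p hp => h2 p (Or.inr hp)⟩

theorem pvCmax_le (P : List (List Int)) (v : Int) :
    pvCmax P ≤ v ↔ 0 ≤ v ∧ ∀ p ∈ P, pvG p ≤ v := pv_foldl_max_le P 0 v

theorem pvCmax_append (P : List (List Int)) (s : List Int) :
    pvCmax (P ++ [s]) = max (pvCmax P) (pvG s) := by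
  unfold pvCmax; rw [List.foldl_append]; rfl

-- the sort key and its order: key p ≤ key s unfolds to the lexicographic comparison
def pvKey (x : List Int) : Lex (Int × Int) := toLex (-(x.getD 0 0), x.getD 1 0)

theorem pvKey_le (p s : List Int) :
    pvKey p ≤ pvKey s ↔ pvF s < pvF p ∨ (pvF p = pvF s ∧ pvG p ≤ pvG s) := by
  unfold pvKey pvF pvG
  rw [Prod.Lex.le_iff]
  simp only [ofLex_toLex]
  omega

-- check > g s  ⟺  A treats s as dominated, for s the head of the unprocessed suffix
theorem pv_check_iff (ys P rest' : List (List Int)) (s : List Int)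
    (hys : ys = P ++ s :: rest')
    (hsort : ys.Pairwise (fun a b => pvKey a ≤ pvKey b)) :
    pvG s < pvCmax P ↔ pvBadA ys s := by
  subst hys
  rw [List.pairwise_append] at hsort
  obtain ⟨hP, hrest, hcross⟩ := hsort
  have hPs : ∀ p ∈ P, pvG s < pvG p → pvF s < pvF p := by
    intro p hp hg
    rcases (pvKey_le p s).mp (hcross p hp s (List.mem_cons_self)) with h | ⟨h1, h2⟩
    · exact h
    · omega
  have hsuf : ∀ t ∈ s :: rest', ¬ (pvF s < pvF t) := by
    intro t ht
    rcases List.mem_cons.mp ht with rfl | ht'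
    · omega
    · rcases (pvKey_le s t).mp ((List.pairwise_cons.mp hrest).1 t ht') with h | ⟨h1, h2⟩
      · omega
      · omega
  constructor
  · intro h
    by_cases h0 : pvG s < 0
    · exact Or.inl h0
    · have := (pvCmax_le P (pvG s)).not.mp (by omega)
      push_neg at this
      obtain ⟨p, hp, hgp⟩ := this (by omega)
      exact Or.inr ⟨p, List.mem_append_left _ hp, hPs p hp hgp, hgp⟩
  · have h0 : 0 ≤ pvCmax P := ((pvCmax_le P (pvCmax P)).mp le_rfl).1
    rintro (h | ⟨t, ht, hf, hg⟩)
    · omega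
    · rcases List.mem_append.mp ht with hP' | hsuf'
      · have := ((pvCmax_le P (pvCmax P)).mp le_rfl).2 t hP'
        omega
      · exact absurd hf (hsuf t hsuf')

-- A's per-suffix counting predicate (as Bool, for List.filter)
def pvCntA (ys : List (List Int)) (me : List Int) (s : List Int) : Bool :=
  decide (me.getD 0 0 + me.getD 1 0 < pvF s + pvG s) && !(decide (pvBadA ys s))

-- the loop characterisation: processed prefix P with check = pvCmax P
theorem solLoopA_eq (me : List Int) (ys : List (List Int))
    (hsort : ys.Pairwise (fun a b => pvKey a ≤ pvKey b)) :
    ∀ (rest P : List (List Int)), ys = P ++ rest → ∀ answer : Int,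
      solLoopA me rest (pvCmax P) answer =
        if me ∈ rest ∧ pvBadA ys me then -1
        else answer + ((rest.filter (pvCntA ys me)).length : Int) := by
  intro rest
  induction rest with
  | nil => intro P h answer; simp [solLoopA]
  | cons s rest' ih =>
    intro P hys answer
    have hcheck := pv_check_iff ys P rest' s hys hsort
    have hnext : ∀ c : Int, c = pvCmax (P ++ [s]) →
        ∀ a : Int, solLoopA me rest' c a =
          if me ∈ rest' ∧ pvBadA ys me then -1
          else a + ((rest'.filter (pvCntA ys me)).length : Int) := by
      intro c hc a
      rw [hc]
      exact ih (P ++ [s]) (by simpa using hys) a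
    by_cases hme : me = s
    · -- Python: me == score branch
      subst hme
      by_cases hbad : pvBadA ys me
      · have hlt : me.getD 1 0 < pvCmax P := hcheck.mpr hbad
        have h1 : solLoopA me (me :: rest') (pvCmax P) answer = -1 := by
          rw [solLoopA, if_pos rfl, if_pos hlt]
        rw [h1, if_pos (⟨List.mem_cons_self, hbad⟩ : me ∈ me :: rest' ∧ pvBadA ys me)]
      · have hge : ¬ (me.getD 1 0 < pvCmax P) := fun h => hbad (hcheck.mp h)
        have h1 : solLoopA me (me :: rest') (pvCmax P) answer
            = solLoopA me rest' (me.getD 1 0) answer := by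
          rw [solLoopA, if_pos rfl, if_neg hge]
        have hc : (me.getD 1 0 : Int) = pvCmax (P ++ [me]) := by
          have h0 : 0 ≤ pvCmax P := ((pvCmax_le P (pvCmax P)).mp le_rfl).1
          rw [pvCmax_append]
          unfold pvG at hge ⊢
          omega
        rw [h1, hnext _ hc answer]
        have hcnt : pvCntA ys me me = false := by
          simp [pvCntA, pvF, pvG]
        rw [if_neg (fun h => hbad h.2), if_neg (fun h => hbad h.2)]
        simp [List.filter_cons, hcnt]
    · -- Python: the general branch
      rw [solLoopA]
      rw [if_neg hme]
      have hmem : (me ∈ s :: rest') ↔ (me ∈ rest') := by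
        simp [List.mem_cons, hme]
      by_cases hge : s.getD 1 0 ≥ pvCmax P
      · -- score[1] >= check: undominated in A's sense
        rw [if_pos hge]
        have hnb : ¬ pvBadA ys s := fun h => by
          have := hcheck.mpr h; unfold pvG at this; omega
        have hc : (s.getD 1 0 : Int) = pvCmax (P ++ [s]) := by
          rw [pvCmax_append]; unfold pvG; omega
        rw [hnext _ hc _]
        rw [show ((if me ∈ s :: rest' ∧ pvBadA ys me then (-1 : Int)
            else answer + (((s :: rest').filter (pvCntA ys me)).length : Int))) =
            (if me ∈ rest' ∧ pvBadA ys me then (-1 : Int)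
            else answer + (((s :: rest').filter (pvCntA ys me)).length : Int)) by
          by_cases h : me ∈ rest' ∧ pvBadA ys me
          · rw [if_pos h, if_pos ⟨hmem.mpr h.1, h.2⟩]
          · rw [if_neg h]
            by_cases h2 : me ∈ s :: rest' ∧ pvBadA ys me
            · exact absurd ⟨hmem.mp h2.1, h2.2⟩ h
            · rw [if_neg h2]]
        by_cases hsum : s.getD 0 0 + s.getD 1 0 > me.getD 0 0 + me.getD 1 0
        · have hcnt : pvCntA ys me s = true := by
            simp only [pvCntA, pvF, pvG, Bool.and_eq_true, decide_eq_true_eq,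
              Bool.not_eq_true', decide_eq_false_iff_not]
            exact ⟨by omega, hnb⟩
          rw [if_pos hsum]
          by_cases h : me ∈ rest' ∧ pvBadA ys me
          · rw [if_pos h, if_pos h]
          · rw [if_neg h, if_neg h]
            simp only [List.filter_cons, hcnt, if_pos, List.length_cons]
            push_cast
            ring
        · have hcnt : pvCntA ys me s = false := by
            simp only [pvCntA, pvF, pvG]
            simp only [Bool.and_eq_false_iff, decide_eq_false_iff_not]
            left; omega
          rw [if_neg hsum]
          by_cases h : me ∈ rest' ∧ pvBadA ys me
          · rw [if_pos h, if_pos h]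
          · rw [if_neg h, if_neg h]
            simp [List.filter_cons, hcnt]
      · -- score[1] < check: A skips s (treated as dominated)
        rw [if_neg hge]
        have hlt2 : pvG s < pvCmax P := by unfold pvG; omega
        have hb : pvBadA ys s := hcheck.mp hlt2
        have hcnt : pvCntA ys me s = false := by
          simp only [pvCntA]
          simp only [Bool.and_eq_false_iff, Bool.not_eq_false', decide_eq_true_eq]
          right; exact hb
        have hc : pvCmax P = pvCmax (P ++ [s]) := by
          rw [pvCmax_append]; unfold pvG at hge; omega
        rw [hnext _ hc answer]
        by_cases h : me ∈ rest' ∧ pvBadA ys me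
        · rw [if_pos h, if_pos ⟨hmem.mpr h.1, h.2⟩]
        · rw [if_neg h, if_neg (fun h2 => h ⟨hmem.mp h2.1, h2.2⟩)]
          simp [List.filter_cons, hcnt]

-- beats (Bool, B's helper) agrees with pvLoses (Prop)
theorem beats_iff (l : List (List Int)) (s : List Int) :
    beats l (s.getD 0 0) (s.getD 1 0) = true ↔ pvLoses l s := by
  unfold beats pvLoses pvF pvG
  simp

-- B's foldl counter is 1 + a filter length
theorem foldl_count (p : List Int → Bool) (l : List (List Int)) :
    ∀ a : Int, l.foldl (fun answer s => if p s then answer + 1 else answer) a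
      = a + ((l.filter p).length : Int) := by
  induction l with
  | nil => intro a; simp
  | cons s l ih =>
    intro a
    by_cases h : p s
    · simp only [List.foldl_cons, h, if_pos, List.filter_cons, ih, List.length_cons]
      push_cast
      ring
    · simp only [List.foldl_cons, h, if_neg, List.filter_cons, ih]
      simp [h]

-- closed forms of the two ports on a nonempty input
theorem solution_closed (me : List Int) (tl : List (List Int)) :
    solution (me :: tl) =
      (if pvBadA (PySem.List.sorted (me :: tl) pvKey) me then -1
       else 1 + (((PySem.List.sorted (me :: tl) pvKey).filter
          (pvCntA (PySem.List.sorted (me :: tl) pvKey) me)).length : Int)) := by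
  have hL : solution (me :: tl) = solLoopA me (PySem.List.sorted (me :: tl) pvKey) 0 1 := rfl
  have hperm := PySem.List.sorted_perm (me :: tl) pvKey false
  have hmem : me ∈ PySem.List.sorted (me :: tl) pvKey := by
    rw [PySem.List.mem_sorted]; exact List.mem_cons_self
  have h := solLoopA_eq me (PySem.List.sorted (me :: tl) pvKey)
      (PySem.List.sorted_pairwise (me :: tl) pvKey)
      (PySem.List.sorted (me :: tl) pvKey) [] rfl 1
  simp only [pvCmax, List.foldl_nil] at h
  rw [hL, h]
  by_cases hb : pvBadA (PySem.List.sorted (me :: tl) pvKey) me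
  · rw [if_pos ⟨hmem, hb⟩, if_pos hb]
  · rw [if_neg (fun h2 => hb h2.2), if_neg hb]

theorem solution_alt_closed (me : List Int) (tl : List (List Int)) :
    solution_alt (me :: tl) =
      (if pvLoses (PySem.List.sorted (me :: tl) pvKey) me then -1
       else 1 + (((PySem.List.sorted (me :: tl) pvKey).filter
          (fun s => decide (me.getD 0 0 + me.getD 1 0 < s.getD 0 0 + s.getD 1 0)
            && !(decide (pvLoses (PySem.List.sorted (me :: tl) pvKey) s)))).length : Int)) := by
  have hL : solution_alt (me :: tl) =
      (if beats (PySem.List.sorted (me :: tl) pvKey) (me.getD 0 0) (me.getD 1 0) then -1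
       else (PySem.List.sorted (me :: tl) pvKey).foldl
         (fun answer s =>
           if decide (s.getD 0 0 + s.getD 1 0 > me.getD 0 0 + me.getD 1 0)
               && !beats (PySem.List.sorted (me :: tl) pvKey) (s.getD 0 0) (s.getD 1 0)
           then answer + 1 else answer) 1) := rfl
  rw [hL]
  by_cases hb : pvLoses (PySem.List.sorted (me :: tl) pvKey) me
  · rw [if_pos ((beats_iff _ me).mpr hb), if_pos hb]
  · rw [if_neg (fun h => hb ((beats_iff _ me).mp h)), if_neg hb,
      foldl_count _ _ 1]
    have hfe : List.filter
        (fun s => decide (s.getD 0 0 + s.getD 1 0 > me.getD 0 0 + me.getD 1 0)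
          && !beats (PySem.List.sorted (me :: tl) pvKey) (s.getD 0 0) (s.getD 1 0))
        (PySem.List.sorted (me :: tl) pvKey)
        = List.filter
        (fun s => decide (me.getD 0 0 + me.getD 1 0 < s.getD 0 0 + s.getD 1 0)
          && !decide (pvLoses (PySem.List.sorted (me :: tl) pvKey) s))
        (PySem.List.sorted (me :: tl) pvKey) := by
      apply List.filter_congr
      intro s _
      have h2 : beats (PySem.List.sorted (me :: tl) pvKey) (s.getD 0 0) (s.getD 1 0)
          = decide (pvLoses (PySem.List.sorted (me :: tl) pvKey) s) := by
        by_cases h : pvLoses (PySem.List.sorted (me :: tl) pvKey) s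
        · rw [(beats_iff _ s).mpr h, decide_eq_true h]
        · have hb2 : ¬ beats (PySem.List.sorted (me :: tl) pvKey) (s.getD 0 0) (s.getD 1 0) = true :=
            fun hh => h ((beats_iff _ s).mp hh)
          rw [Bool.eq_false_iff.mpr hb2, decide_eq_false h]
      rw [h2, Bool.eq_iff_iff]
    rw [hfe]

-- transfer of strict domination between the sorted list and the original
theorem pvLoses_sorted (l : List (List Int)) (s : List Int) :
    pvLoses (PySem.List.sorted l pvKey) s ↔ pvLoses l s := by
  unfold pvLoses
  simp [PySem.List.mem_sorted]

-- D_solution on a cons cell, in the pvF/pvG/pvLoses vocabulary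
theorem D_cons (me : List Int) (tl : List (List Int)) :
    D_solution (me :: tl) ↔
      (¬ pvLoses (me :: tl) me ∧
        (pvG me < 0 ∨ ∃ s ∈ me :: tl, pvG s < 0 ∧
          pvF me + pvG me < pvF s + pvG s ∧ ¬ pvLoses (me :: tl) s)) := by
  unfold D_solution pvBeat pvSum pvNeg pvLoses pvF pvG
  simp

theorem solution_spec_aux : ∀ (scores : List (List Int)), Pre_solution scores →
    ¬ D_solution scores → solution scores = solution_alt scores := by
  intro scores hpre hnd
  obtain ⟨hne, hlen⟩ := hpre
  cases scores with
  | nil => exact absurd rfl hne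
  | cons me tl =>
    rw [solution_closed, solution_alt_closed]
    have hnd' : ¬ (¬ pvLoses (me :: tl) me ∧
        (pvG me < 0 ∨ ∃ s ∈ me :: tl, pvG s < 0 ∧
          pvF me + pvG me < pvF s + pvG s ∧ ¬ pvLoses (me :: tl) s)) :=
      fun h => hnd ((D_cons me tl).mpr h)
    by_cases hdom1 : pvLoses (PySem.List.sorted (me :: tl) pvKey) me
    · have hb : pvBadA (PySem.List.sorted (me :: tl) pvKey) me := Or.inr hdom1
      rw [if_pos hb, if_pos hdom1]
    · have hdomS : ¬ pvLoses (me :: tl) me :=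
        fun h => hdom1 ((pvLoses_sorted (me :: tl) me).mpr h)
      have hrest : ¬ (pvG me < 0 ∨ ∃ s ∈ me :: tl, pvG s < 0 ∧
          pvF me + pvG me < pvF s + pvG s ∧ ¬ pvLoses (me :: tl) s) :=
        fun h => hnd' ⟨hdomS, h⟩
      push_neg at hrest
      obtain ⟨hg0, hW⟩ := hrest
      have hbad : ¬ pvBadA (PySem.List.sorted (me :: tl) pvKey) me := by
        rintro (h | h)
        · omega
        · exact hdom1 h
      rw [if_neg hbad, if_neg hdom1]
      have hfe2 : (PySem.List.sorted (me :: tl) pvKey).filter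
            (pvCntA (PySem.List.sorted (me :: tl) pvKey) me)
          = (PySem.List.sorted (me :: tl) pvKey).filter
            (fun s => decide (me.getD 0 0 + me.getD 1 0 < s.getD 0 0 + s.getD 1 0)
              && !decide (pvLoses (PySem.List.sorted (me :: tl) pvKey) s)) := by
        apply List.filter_congr
        intro s hs
        have hsmem : s ∈ me :: tl := by
          rw [PySem.List.mem_sorted] at hs; exact hs
        rw [Bool.eq_iff_iff]
        simp only [pvCntA, pvBadA, pvF, pvG, Bool.and_eq_true, decide_eq_true_eq,
          Bool.not_eq_true', decide_eq_false_iff_not]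
        constructor
        · rintro ⟨h1, h2⟩
          exact ⟨h1, fun hd => h2 (Or.inr hd)⟩
        · rintro ⟨h1, h2⟩
          refine ⟨h1, ?_⟩
          rintro (hneg | hd)
          · exact h2 ((pvLoses_sorted (me :: tl) s).mpr (hW s hsmem hneg h1))
          · exact h2 hd
      rw [hfe2]

theorem solution_tight_aux : ∀ (scores : List (List Int)), Pre_solution scores →
    D_solution scores → solution scores ≠ solution_alt scores := by
  intro scores hpre hd
  obtain ⟨hne, hlen⟩ := hpre
  cases scores with
  | nil => exact absurd rfl hne
  | cons me tl =>
    obtain ⟨hdomS, hcase⟩ := (D_cons me tl).mp hd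
    have hdom1 : ¬ pvLoses (PySem.List.sorted (me :: tl) pvKey) me :=
      fun h => hdomS ((pvLoses_sorted (me :: tl) me).mp h)
    rw [solution_closed, solution_alt_closed, if_neg hdom1]
    by_cases hg : pvG me < 0
    · have hb : pvBadA (PySem.List.sorted (me :: tl) pvKey) me := Or.inl hg
      rw [if_pos hb]
      have h0 : (0:Int) ≤
          (((PySem.List.sorted (me :: tl) pvKey).filter
            (fun s => decide (me.getD 0 0 + me.getD 1 0 < s.getD 0 0 + s.getD 1 0)
              && !decide (pvLoses (PySem.List.sorted (me :: tl) pvKey) s))).length : Int) :=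
        Int.natCast_nonneg _
      omega
    · rcases hcase with hg' | ⟨s0, hs0mem, hs0neg, hs0sum, hs0undom⟩
      · exact absurd hg' hg
      have hbad : ¬ pvBadA (PySem.List.sorted (me :: tl) pvKey) me := by
        rintro (h | h)
        · exact hg h
        · exact hdom1 h
      rw [if_neg hbad]
      have himp : ∀ x, pvCntA (PySem.List.sorted (me :: tl) pvKey) me x = true →
          (decide (me.getD 0 0 + me.getD 1 0 < x.getD 0 0 + x.getD 1 0)
            && !decide (pvLoses (PySem.List.sorted (me :: tl) pvKey) x)) = true := by
        intro x hx
        simp only [pvCntA, Bool.and_eq_true, decide_eq_true_eq, Bool.not_eq_true',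
          decide_eq_false_iff_not] at hx ⊢
        exact ⟨hx.1, fun hd' => hx.2 (Or.inr hd')⟩
      have h1 : (PySem.List.sorted (me :: tl) pvKey).filter
            (pvCntA (PySem.List.sorted (me :: tl) pvKey) me)
          = ((PySem.List.sorted (me :: tl) pvKey).filter
              (fun x => decide (me.getD 0 0 + me.getD 1 0 < x.getD 0 0 + x.getD 1 0)
                && !decide (pvLoses (PySem.List.sorted (me :: tl) pvKey) x))).filter
            (pvCntA (PySem.List.sorted (me :: tl) pvKey) me) := by
        rw [List.filter_filter]
        apply List.filter_congr
        intro x _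
        cases hx : pvCntA (PySem.List.sorted (me :: tl) pvKey) me x
        · simp
        · rw [Bool.true_and, himp x hx]
      have hs0ys : s0 ∈ PySem.List.sorted (me :: tl) pvKey := by
        rw [PySem.List.mem_sorted]; exact hs0mem
      have hqs0 : (decide (me.getD 0 0 + me.getD 1 0 < s0.getD 0 0 + s0.getD 1 0)
          && !decide (pvLoses (PySem.List.sorted (me :: tl) pvKey) s0)) = true := by
        have hnd0 : ¬ pvLoses (PySem.List.sorted (me :: tl) pvKey) s0 :=
          fun h => hs0undom ((pvLoses_sorted (me :: tl) s0).mp h)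
        simp only [Bool.and_eq_true, decide_eq_true_eq, Bool.not_eq_true',
          decide_eq_false_iff_not]
        exact ⟨hs0sum, hnd0⟩
      have hps0 : pvCntA (PySem.List.sorted (me :: tl) pvKey) me s0 = false := by
        simp [pvCntA, pvBadA, hs0neg]
      have hlt : ((PySem.List.sorted (me :: tl) pvKey).filter
            (pvCntA (PySem.List.sorted (me :: tl) pvKey) me)).length
          < ((PySem.List.sorted (me :: tl) pvKey).filter
              (fun s => decide (me.getD 0 0 + me.getD 1 0 < s.getD 0 0 + s.getD 1 0)
                && !decide (pvLoses (PySem.List.sorted (me :: tl) pvKey) s))).length := by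
        rw [h1]
        refine List.length_filter_lt_length_iff_exists.mpr ⟨s0, ?_, ?_⟩
        · exact List.mem_filter.mpr ⟨hs0ys, hqs0⟩
        · simp [hps0]
      omega

-- ===== VERDICT (by name: the statement is the Claim_ definition above) =====
theorem solution_spec : Claim_unchanged_solution := by
  intro scores _hdom hpre hnd
  exact solution_spec_aux scores hpre hnd

theorem solution_changed : Claim_changed_solution := by
  unfold Claim_changed_solution; decide

theorem solution_tight : Claim_exact_solution := by
  intro scores _hdom hpre hd
  exact solution_tight_aux scores hpre hd
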